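-- pv_equiv track=rewrite | github.com/belhamra1/tokenization | test.py | get_last_random_number
-- ===== SOURCE A (Python) =====
-- class MinimalStandardGenerator:
--     def __init__(self, seed=1):
--         self.a = 16807
--         self.m = 2**31 - 1
--         self.seed = seed #le premier element cad x0
--
--     def generate(self):
--         self.seed = (self.a * self.seed) % self.m
--         return self.seed
--
-- def get_last_random_number(j):
--     generator = MinimalStandardGenerator(seed=1)
--     last_random_number = 0
--
--
--     for _ in range(j):
--         random_number = generator.generate()
--
--     last_random_number = random_number**3
--
--
--
--     while(len(str(last_random_number)) <16):
--        last_random_number=int(last_random_number)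
--        last_random_number +=1
--
--
--     last_random_number=int(str(last_random_number)[:16])
--
--
--     return last_random_number
-- ===== SOURCE B (Python) =====
-- def get_last_random_number(j):
--     # LCG output after j steps, by modular exponentiation instead of iterating j times
--     v = pow(16807, j, 2**31 - 1) ** 3
--     # pad to at least 16 digits: the increment loop just climbs to the first 16-digit number
--     if v < 10**15:
--         v = 10**15
--     return int(str(v)[:16])
-- ===== Notes on version B (the rewrite author's own statement) =====
-- stated objective: faster
-- what changed: The j-step LCG iteration is replaced by one modular exponentiation pow(16807, j, 2**31-1), and the increment-by-one padding loop (up to ~10**15 iterations) is replaced by taking max with 10**15, the first 16-digit number.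
import Mathlib
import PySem

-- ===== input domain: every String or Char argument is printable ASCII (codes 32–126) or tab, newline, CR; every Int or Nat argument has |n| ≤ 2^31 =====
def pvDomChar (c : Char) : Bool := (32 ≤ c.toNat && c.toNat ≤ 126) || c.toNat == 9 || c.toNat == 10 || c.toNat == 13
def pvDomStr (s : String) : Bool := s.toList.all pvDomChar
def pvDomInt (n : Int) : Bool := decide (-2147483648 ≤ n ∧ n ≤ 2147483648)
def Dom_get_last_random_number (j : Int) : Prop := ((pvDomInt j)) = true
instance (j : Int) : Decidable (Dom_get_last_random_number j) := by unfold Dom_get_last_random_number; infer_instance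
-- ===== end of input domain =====

-- B replaces A's j-step LCG loop by one modular exponentiation and A's
-- increment-by-one padding loop by taking the maximum with 10^15 (faster).


-- int(str(v)[:16]) — this line is verbatim in both Python programs, so both ports share it.
-- int() cannot raise here: the slice of str(v) for the v both programs feed in is a nonempty
-- digit string, so ofStr? is `some`; `getD 0` only unwraps it.
def pvStr16 (v : Int) : Int :=
  (PySem.Int.ofStr? (PySem.Str.slice (PySem.Int.toStr v) none (some 16))).getD 0

-- ===== PORT A =====
-- `for _ in range(j): random_number = generator.generate()` — seed := (16807*seed) % (2**31-1)
def pvLcg : Nat → Int → Int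
  | 0, s => s
  | n+1, s => pvLcg n (PySem.Int.mod (16807 * s) 2147483647)

-- termination helper for pvPad, cited in its decreasing_by
lemma pvPad_dec (v : Int) (h : PySem.Str.len (PySem.Int.toStr v) < 16) :
    v < 1000000000000000 := by
  by_cases hv : v < 0
  · omega
  · have hlen : (PySem.Int.toChars v).length < 16 := by
      have : PySem.Str.len (PySem.Int.toStr v) = (PySem.Int.toChars v).length := by
        simp [pysem, PySem.Int.toList_toStr]
      omega
    have hch : PySem.Int.toChars v = Nat.toDigits 10 v.toNat := by
      simp [PySem.Int.toChars, hv]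
    rw [hch] at hlen
    have := (Nat.length_toDigits_le_iff (b := 10) (n := v.toNat) (k := 15)
      (by norm_num) (by norm_num)).mp (by omega)
    have h10 : (10:Nat)^15 = 1000000000000000 := by norm_num
    omega

-- `while len(str(last_random_number)) < 16: last_random_number += 1`
-- (the inner `int(...)` is the identity on an int and is not re-stated)
def pvPad (v : Int) : Int :=
  if PySem.Str.len (PySem.Int.toStr v) < 16 then pvPad (v + 1) else v
termination_by (1000000000000000 - v).toNat
decreasing_by
  have := pvPad_dec v (by assumption)
  omega

def get_last_random_number (j : Int) : Int :=
  pvStr16 (pvPad ((pvLcg j.toNat 1) ^ 3))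

-- ===== PORT B =====
-- pow(16807, j, 2**31 - 1) is PySem.Int.powMod; exponent j.toNat is exact for the j ≥ 0 admitted here
-- `if v < 10**15: v = 10**15`
def pvPadFast (v : Int) : Int := if v < 10^15 then (10^15 : Int) else v

def get_last_random_number_alt (j : Int) : Int :=
  pvStr16 (pvPadFast ((PySem.Int.powMod 16807 j.toNat (2^31 - 1)) ^ 3))

-- ===== PRECONDITION & SPEC =====
-- Pre_ excludes exactly j ≤ 0, where A raises UnboundLocalError (random_number is never assigned).
def Pre_get_last_random_number (j : Int) : Prop := 1 ≤ j
instance (j : Int) : Decidable (Pre_get_last_random_number j) := by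
  unfold Pre_get_last_random_number; infer_instance

def pvWitness_get_last_random_number : Int := 2

def Spec_get_last_random_number (j : Int) (out : Int) : Prop := out = get_last_random_number_alt j
instance (j : Int) (out : Int) : Decidable (Spec_get_last_random_number j out) := by unfold Spec_get_last_random_number; infer_instance

-- ===== CLAIM (what is proved, stated in full; the proofs are below) =====
def Claim_equal_get_last_random_number : Prop := ∀ (j : Int), Dom_get_last_random_number j → Pre_get_last_random_number j → Spec_get_last_random_number j (get_last_random_number j)

-- ===== LEMMAS AND PROOFS =====

lemma pvLen_ge (v : Int) (_hv : 0 ≤ v) (h : 1000000000000000 ≤ v) :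
    ¬ PySem.Str.len (PySem.Int.toStr v) < 16 := by
  intro hlt
  have := pvPad_dec v hlt
  omega

lemma pvLen_lt (v : Int) (hv : 0 ≤ v) (h : v < 1000000000000000) :
    PySem.Str.len (PySem.Int.toStr v) < 16 := by
  have hs : PySem.Str.len (PySem.Int.toStr v) = (PySem.Int.toChars v).length := by
    simp [pysem, PySem.Int.toList_toStr]
  have hch : PySem.Int.toChars v = Nat.toDigits 10 v.toNat := by
    simp [PySem.Int.toChars, not_lt.mpr hv]
  rw [hch] at hs
  have h10 : (10:Nat)^15 = 1000000000000000 := by norm_num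
  have := (Nat.length_toDigits_le_iff (b := 10) (n := v.toNat) (k := 15)
    (by norm_num) (by norm_num)).mpr (by omega)
  omega

lemma pvPad_ge (v : Int) (hv : 0 ≤ v) (h : 1000000000000000 ≤ v) : pvPad v = v := by
  have hlen := pvLen_ge v hv h
  rw [pvPad.eq_def, if_neg hlen]

lemma pvPad_lt : ∀ (k : Nat) (v : Int), 0 ≤ v → 1000000000000000 - v ≤ (k : Int) →
    v < 1000000000000000 → pvPad v = 1000000000000000 := by
  intro k
  induction k with
  | zero => intro v hv hk hlt; omega
  | succ k ih =>
    intro v hv hk hlt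
    have hlen := pvLen_lt v hv hlt
    rw [pvPad.eq_def, if_pos hlen]
    by_cases hv1 : v + 1 < 1000000000000000
    · exact ih (v + 1) (by omega) (by omega) hv1
    · have : v + 1 = 1000000000000000 := by omega
      rw [this]
      exact pvPad_ge _ (by omega) le_rfl

lemma pvPad_eq (v : Int) (hv : 0 ≤ v) :
    pvPad v = if v < 10^15 then (10^15 : Int) else v := by
  have h10 : (10:Int)^15 = 1000000000000000 := by norm_num
  rw [h10]
  by_cases h : v < 1000000000000000
  · rw [if_pos h]
    exact pvPad_lt (1000000000000000 - v).toNat v hv (by omega) h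
  · rw [if_neg h]
    exact pvPad_ge v hv (by omega)

lemma pvLcg_eq (n : Nat) : ∀ s : Int,
    pvLcg (n + 1) s = PySem.Int.mod (16807 ^ (n + 1) * s) 2147483647 := by
  induction n with
  | zero => intro s; simp [pvLcg, pow_one]
  | succ k ih =>
    intro s
    show pvLcg (k + 1) (PySem.Int.mod (16807 * s) 2147483647) = _
    rw [ih]
    have hm : (0:Int) < 2147483647 := by norm_num
    rw [PySem.Int.mod_eq_emod_of_pos hm, PySem.Int.mod_eq_emod_of_pos hm,
        PySem.Int.mod_eq_emod_of_pos hm]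
    rw [Int.mul_emod (16807 ^ (k + 1)), Int.emod_emod_of_dvd _ dvd_rfl,
        ← Int.mul_emod]
    ring_nf

-- ===== VERDICT (by name: the statement is the Claim_ definition above) =====
theorem get_last_random_number_spec : Claim_equal_get_last_random_number := by
  intro j _ hpre
  unfold Pre_get_last_random_number at hpre
  unfold Spec_get_last_random_number
  obtain ⟨k, hk⟩ : ∃ k : Nat, j.toNat = k + 1 := ⟨j.toNat - 1, by omega⟩
  unfold get_last_random_number get_last_random_number_alt
  rw [hk, pvLcg_eq, PySem.Int.powMod_eq]
  have hm : (2:Int)^31 - 1 = 2147483647 := by norm_num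
  rw [hm, mul_one]
  have hnn : 0 ≤ (PySem.Int.mod (16807 ^ (k + 1)) 2147483647) ^ 3 :=
    pow_nonneg (PySem.Int.mod_nonneg _ (by norm_num)) 3
  unfold pvPadFast
  rw [pvPad_eq _ hnn]
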